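-- pv_equiv track=rewrite | github.com/goodwinc/codefights | crosswordformation.py | crosswordFormation
-- ===== SOURCE A (Python) =====
-- def crosswordFormation(words):
--     count = 0
--     for north in words:
--         words1 = words[:]
--         words1.remove(north)
--         for east in words1:
--             words2 = words1[:]
--             words2.remove(east)
--             for south in words2:
--                 words3 = words2[:]
--                 words3.remove(south)
--                 for west in words3:
--                     for i in range(2, len(north)):
--                         for j in range(len(east)-2):
--                             if north[i] == east[j]:
--                                 for k in range(i-1):
--                                     for l in range(len(west)-2):
--                                         if north[k] == west[l]:
--                                             for m in range(l+2, len(west)):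
--                                                 for n in range(len(south)-(i-k)):
--                                                     try:
--                                                         if (west[m] == south[n] and
--                                                             south[n+i-k] == east[j+m-l]):
--                                                                 count+=1
--                                                     except IndexError:
--                                                         pass
--     return count
-- ===== SOURCE B (Python) =====
-- def _positions(word):
--     pos = {}
--     for idx, ch in enumerate(word):
--         pos.setdefault(ch, []).append(idx)
--     return pos
--
--
-- def _crossCount(north, east, south, west, ijs, posS, posW):
--     lenE, lenS, lenW = len(east), len(south), len(west)
--     total = 0
--     for i, j in ijs:
--         for k in range(i - 1):
--             d = i - k
--             for l in posW.get(north[k], []):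
--                 if l <= lenW - 3:
--                     for m in range(l + 2, lenW):
--                         for n in posS.get(west[m], []):
--                             if n + d < lenS and j + m - l < lenE and south[n + d] == east[j + m - l]:
--                                 total += 1
--     return total
--
--
-- def crosswordFormation(words):
--     index = {w: _positions(w) for w in words}
--     count = 0
--     for north in words:
--         words1 = words[:]
--         words1.remove(north)
--         for east in words1:
--             posE = index[east]
--             ijs = [(i, j)
--                    for i in range(2, len(north))
--                    for j in posE.get(north[i], [])
--                    if j <= len(east) - 3]
--             words2 = words1[:]
--             words2.remove(east)
--             for south in words2:
--                 posS = index[south]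
--                 words3 = words2[:]
--                 words3.remove(south)
--                 for west in words3:
--                     count += _crossCount(north, east, south, west,
--                                          ijs, posS, index[west])
--     return count
-- ===== Notes on version B (the rewrite author's own statement) =====
-- stated objective: faster
-- what changed: B builds a char->positions dictionary once per word and precomputes the matching (i,j) north/east intersection pairs once per word pair, so the three inner character scans of A iterate only over matching positions, and the try/except IndexError becomes an arithmetic bound check; intended as faster - a timing run measured B about 2.2x faster than A at n=16 words (at n=64 both exceed that run's budget, since the ordered-quadruple enumeration itself is Omega(W^4)).
import Mathlib
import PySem

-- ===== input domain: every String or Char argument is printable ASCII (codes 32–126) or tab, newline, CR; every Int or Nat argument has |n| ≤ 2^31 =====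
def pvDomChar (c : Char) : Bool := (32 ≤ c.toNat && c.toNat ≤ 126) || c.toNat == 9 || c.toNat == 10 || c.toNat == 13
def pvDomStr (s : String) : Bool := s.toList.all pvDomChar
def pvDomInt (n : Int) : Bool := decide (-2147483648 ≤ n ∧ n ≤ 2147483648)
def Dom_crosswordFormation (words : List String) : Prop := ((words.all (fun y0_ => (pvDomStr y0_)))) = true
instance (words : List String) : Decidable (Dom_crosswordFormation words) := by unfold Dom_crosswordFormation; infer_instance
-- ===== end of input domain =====

-- B replaces A's three inner character scans by per-word char→positions dictionaries and
-- per-word-pair precomputed intersection pairs (and the try/except by a bound check); intended as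
-- faster: a timing run measured B about 2.2× faster at 16 words (at 64 words both exceed its budget).

-- ===== PORT A =====
def crosswordFormation (words : List String) : Int :=
  words.foldl (fun count north =>
    let words1 := (PySem.List.remove? words north).getD []
    words1.foldl (fun count east =>
      let words2 := (PySem.List.remove? words1 east).getD []
      words2.foldl (fun count south =>
        let words3 := (PySem.List.remove? words2 south).getD []
        words3.foldl (fun count west =>
          let N := north.toList
          let E := east.toList
          let S := south.toList
          let W := west.toList
          (PySem.List.pyRange 2 (N.length : Int) 1).foldl (fun count i =>
            (PySem.List.pyRange 0 ((E.length : Int) - 2) 1).foldl (fun count j =>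
              if PySem.List.pyGetD N i ' ' == PySem.List.pyGetD E j ' ' then
                (PySem.List.pyRange 0 (i - 1) 1).foldl (fun count k =>
                  (PySem.List.pyRange 0 ((W.length : Int) - 2) 1).foldl (fun count l =>
                    if PySem.List.pyGetD N k ' ' == PySem.List.pyGetD W l ' ' then
                      (PySem.List.pyRange (l + 2) (W.length : Int) 1).foldl (fun count m =>
                        (PySem.List.pyRange 0 ((S.length : Int) - (i - k)) 1).foldl (fun count n =>
                          -- try/except IndexError: a `none` from any pyGet? below means the
                          -- Python raised (only east[j+m-l] actually can) and the count is kept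
                          (match PySem.List.pyGet? W m, PySem.List.pyGet? S n with
                          | some wm, some sn =>
                            if wm == sn then
                              (match PySem.List.pyGet? S (n + i - k), PySem.List.pyGet? E (j + m - l) with
                              | some s2, some e2 => if s2 == e2 then count + 1 else count
                              | _, _ => count)
                            else count
                          | _, _ => count))
                          count) count
                    else count) count) count
              else count) count) count) count) count) count) 0

-- ===== PORT B =====
-- char → list of its positions in the word (Python: dict built with setdefault(...).append)
def pvPositions (cs : List Char) : PySem.Dict Char (List Int) :=
  (PySem.List.enumerate cs 0).foldl (fun d p => d.modify p.2 [] (· ++ [p.1])) PySem.Dict.empty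

def pvIJs (N E : List Char) (posE : PySem.Dict Char (List Int)) : List (Int × Int) :=
  (PySem.List.pyRange 2 (N.length : Int) 1).flatMap (fun i =>
    ((posE.getD (PySem.List.pyGetD N i ' ') []).filter
        (fun j => decide (j ≤ (E.length : Int) - 3))).map (fun j => (i, j)))

def pvCrossCount (north east south west : String) (ijs : List (Int × Int))
    (posS posW : PySem.Dict Char (List Int)) : Int :=
  let N := north.toList
  let E := east.toList
  let S := south.toList
  let W := west.toList
  let lenE : Int := E.length
  let lenS : Int := S.length
  let lenW : Int := W.length
  ijs.foldl (fun total p =>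
    (PySem.List.pyRange 0 (p.1 - 1) 1).foldl (fun total k =>
      let d := p.1 - k
      (posW.getD (PySem.List.pyGetD N k ' ') []).foldl (fun total l =>
        if l ≤ lenW - 3 then
          (PySem.List.pyRange (l + 2) lenW 1).foldl (fun total m =>
            (posS.getD (PySem.List.pyGetD W m ' ') []).foldl (fun total n =>
              if n + d < lenS ∧ p.2 + m - l < lenE ∧
                  PySem.List.pyGetD S (n + d) ' ' = PySem.List.pyGetD E (p.2 + m - l) ' '
              then total + 1 else total) total) total
        else total) total) total) 0

def crosswordFormation_alt (words : List String) : Int :=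
  let index := words.foldl (fun d w => d.insert w (pvPositions w.toList)) PySem.Dict.empty
  words.foldl (fun count north =>
    let words1 := (PySem.List.remove? words north).getD []
    words1.foldl (fun count east =>
      let posE := index.getD east PySem.Dict.empty
      let ijs := pvIJs north.toList east.toList posE
      let words2 := (PySem.List.remove? words1 east).getD []
      words2.foldl (fun count south =>
        let posS := index.getD south PySem.Dict.empty
        let words3 := (PySem.List.remove? words2 south).getD []
        words3.foldl (fun count west =>
          count + pvCrossCount north east south west ijs posS
            (index.getD west PySem.Dict.empty)) count) count) count) 0

-- ===== PRECONDITION & SPEC =====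
def Spec_crosswordFormation (words : List String) (out : Int) : Prop := out = crosswordFormation_alt words
instance (words : List String) (out : Int) : Decidable (Spec_crosswordFormation words out) := by unfold Spec_crosswordFormation; infer_instance

-- ===== CLAIM (what is proved, stated in full; the proofs are below) =====
def Claim_equal_crosswordFormation : Prop := ∀ (words : List String), Dom_crosswordFormation words → Spec_crosswordFormation words (crosswordFormation words)

-- ===== LEMMAS AND PROOFS =====

-- Canonical nested-sum normal form both inner loop nests are reduced to (guards over full ranges).
def cw6 (E S W : List Char) (i j k l m : Int) : Int :=
  ((PySem.List.pyRange 0 (S.length : Int) 1).map (fun n =>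
    if PySem.List.pyGetD S n ' ' = PySem.List.pyGetD W m ' ' ∧ n + (i - k) < (S.length : Int) ∧
        j + m - l < (E.length : Int) ∧
        PySem.List.pyGetD S (n + (i - k)) ' ' = PySem.List.pyGetD E (j + m - l) ' '
    then (1 : Int) else 0)).sum

def cw5 (E S W : List Char) (i j k l : Int) : Int :=
  ((PySem.List.pyRange (l + 2) (W.length : Int) 1).map (fun m => cw6 E S W i j k l m)).sum

def cw4 (N E S W : List Char) (i j k : Int) : Int :=
  ((PySem.List.pyRange 0 (W.length : Int) 1).map (fun l =>
    if PySem.List.pyGetD W l ' ' = PySem.List.pyGetD N k ' ' ∧ l ≤ (W.length : Int) - 3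
    then cw5 E S W i j k l else 0)).sum

def cw3 (N E S W : List Char) (i j : Int) : Int :=
  ((PySem.List.pyRange 0 (i - 1) 1).map (fun k => cw4 N E S W i j k)).sum

def cw2 (N E S W : List Char) (i : Int) : Int :=
  ((PySem.List.pyRange 0 (E.length : Int) 1).map (fun j =>
    if PySem.List.pyGetD E j ' ' = PySem.List.pyGetD N i ' ' ∧ j ≤ (E.length : Int) - 3
    then cw3 N E S W i j else 0)).sum

def cw1 (N E S W : List Char) : Int :=
  ((PySem.List.pyRange 2 (N.length : Int) 1).map (fun i => cw2 N E S W i)).sum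

theorem pvSumExt (L L' : Int) (h : L' ≤ L) (g : Int → Int)
    (h0 : ∀ x, 0 ≤ x → L' ≤ x → g x = 0) :
    ((PySem.List.pyRange 0 L 1).map g).sum = ((PySem.List.pyRange 0 L' 1).map g).sum := by
  by_cases hL : 0 ≤ L'
  · rw [PySem.List.pyRange_one_append 0 L' L hL h, List.map_append, List.sum_append]
    have hz : ((PySem.List.pyRange L' L 1).map g).sum = 0 := by
      rw [List.sum_eq_zero]
      intro x hx
      obtain ⟨a, ha, rfl⟩ := List.mem_map.mp hx
      have hm := (PySem.List.mem_pyRange_one).mp ha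
      exact h0 a (le_trans hL hm.1) hm.1
    rw [hz, add_zero]
  · rw [PySem.List.pyRange_one_eq_nil (by omega : L' ≤ 0)]
    simp only [List.map_nil, List.sum_nil]
    rw [List.sum_eq_zero]
    intro x hx
    obtain ⟨a, ha, rfl⟩ := List.mem_map.mp hx
    have hm := (PySem.List.mem_pyRange_one).mp ha
    exact h0 a hm.1 (by omega)

theorem pvGetSome (xs : List Char) (a : Int) (h0 : 0 ≤ a) (h1 : a < xs.length) :
    PySem.List.pyGet? xs a = some (PySem.List.pyGetD xs a ' ') := by
  lift a to ℕ using h0 with n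
  have h2 : n < xs.length := by exact_mod_cast h1
  simp [PySem.List.pyGet?_natCast, PySem.List.pyGetD_natCast, List.getElem?_eq_getElem h2]

theorem pvGetNone (xs : List Char) (a : Int) (h1 : (xs.length : Int) ≤ a) :
    PySem.List.pyGet? xs a = none := by
  lift a to ℕ using (by omega : (0:Int) ≤ a) with n
  have h2 : xs.length ≤ n := by exact_mod_cast h1
  simp [PySem.List.pyGet?_natCast, List.getElem?_eq_none h2]

theorem pvPositions_getD (cs : List Char) (c : Char) :
    (pvPositions cs).getD c [] =
      (PySem.List.pyRange 0 (cs.length : Int) 1).filter (fun n => PySem.List.pyGetD cs n ' ' == c) := by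
  unfold pvPositions
  rw [PySem.List.enumerate_eq_map_pyRange (d := ' ')]
  rw [List.foldl_map]
  have swap : ∀ (l : List Int) (dd : PySem.Dict Char (List Int)),
      l.foldl (fun d j => d.modify (PySem.List.pyGetD cs j ' ') [] (· ++ [j])) dd
      = (l.map (fun j => (PySem.List.pyGetD cs j ' ', j))).foldl (fun d p => d.modify p.1 [] (· ++ [p.2])) dd := by
    intro l dd; rw [List.foldl_map]
  rw [swap, PySem.Dict.getD_foldl_modify_append, PySem.Dict.getD_empty, List.nil_append]
  rw [List.filter_map, List.map_map]
  simp [Function.comp_def]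

theorem A6 (E S W : List Char) (i j k l m count : Int)
    (hj : 0 ≤ j) (hl : 0 ≤ l) (hm2 : l + 2 ≤ m) (hmW : m < (W.length : Int)) (hik : k ≤ i - 2) :
    (PySem.List.pyRange 0 ((S.length : Int) - (i - k)) 1).foldl (fun count n =>
      (match PySem.List.pyGet? W m, PySem.List.pyGet? S n with
      | some wm, some sn =>
        if wm == sn then
          (match PySem.List.pyGet? S (n + i - k), PySem.List.pyGet? E (j + m - l) with
          | some s2, some e2 => if s2 == e2 then count + 1 else count
          | _, _ => count)
        else count
      | _, _ => count)) count
    = count + cw6 E S W i j k l m := by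
  rw [PySem.List.foldl_congr_mem (g := fun acc n => acc +
    (if PySem.List.pyGetD S n ' ' = PySem.List.pyGetD W m ' ' ∧ n + (i - k) < (S.length : Int) ∧
        j + m - l < (E.length : Int) ∧
        PySem.List.pyGetD S (n + (i - k)) ' ' = PySem.List.pyGetD E (j + m - l) ' '
      then (1 : Int) else 0))]
  · rw [PySem.List.foldl_add, cw6]
    congr 1
    exact (pvSumExt (S.length : Int) ((S.length : Int) - (i - k)) (by omega) _
      (fun x hx0 hx1 => if_neg (fun hc => absurd hc.2.1 (by omega)))).symm
  · intro acc n hn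
    have hmem := (PySem.List.mem_pyRange_one).mp hn
    have harr : n + i - k = n + (i - k) := by ring
    rw [pvGetSome W m (by omega) hmW, pvGetSome S n (by omega) (by omega), harr,
      pvGetSome S (n + (i - k)) (by omega) (by omega)]
    simp only [beq_iff_eq]
    by_cases h1 : PySem.List.pyGetD W m ' ' = PySem.List.pyGetD S n ' '
    · rw [if_pos h1]
      by_cases hE : j + m - l < (E.length : Int)
      · rw [pvGetSome E (j + m - l) (by omega) hE]
        simp only []
        by_cases h3 : PySem.List.pyGetD S (n + (i - k)) ' ' = PySem.List.pyGetD E (j + m - l) ' '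
        · rw [if_pos h3, if_pos ⟨h1.symm, by omega, hE, h3⟩]
        · rw [if_neg h3, if_neg (fun hc => h3 hc.2.2.2), add_zero]
      · rw [pvGetNone E (j + m - l) (by omega), if_neg (fun hc => hE hc.2.2.1), add_zero]
    · rw [if_neg h1, if_neg (fun hc => h1 hc.1.symm), add_zero]

theorem A5 (E S W : List Char) (i j k l count : Int)
    (hj : 0 ≤ j) (hl : 0 ≤ l) (hik : k ≤ i - 2) :
    (PySem.List.pyRange (l + 2) (W.length : Int) 1).foldl (fun count m =>
      (PySem.List.pyRange 0 ((S.length : Int) - (i - k)) 1).foldl (fun count n =>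
        (match PySem.List.pyGet? W m, PySem.List.pyGet? S n with
        | some wm, some sn =>
          if wm == sn then
            (match PySem.List.pyGet? S (n + i - k), PySem.List.pyGet? E (j + m - l) with
            | some s2, some e2 => if s2 == e2 then count + 1 else count
            | _, _ => count)
          else count
        | _, _ => count)) count) count
    = count + cw5 E S W i j k l := by
  rw [PySem.List.foldl_congr_mem (g := fun acc m => acc + cw6 E S W i j k l m)]
  · rw [PySem.List.foldl_add, cw5]
  · intro acc m hm
    have hmem := (PySem.List.mem_pyRange_one).mp hm
    exact A6 E S W i j k l m acc hj hl hmem.1 hmem.2 hik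

theorem A4 (N E S W : List Char) (i j k count : Int)
    (hj : 0 ≤ j) (hik : k ≤ i - 2) :
    (PySem.List.pyRange 0 ((W.length : Int) - 2) 1).foldl (fun count l =>
      if PySem.List.pyGetD N k ' ' == PySem.List.pyGetD W l ' ' then
        (PySem.List.pyRange (l + 2) (W.length : Int) 1).foldl (fun count m =>
          (PySem.List.pyRange 0 ((S.length : Int) - (i - k)) 1).foldl (fun count n =>
            (match PySem.List.pyGet? W m, PySem.List.pyGet? S n with
            | some wm, some sn =>
              if wm == sn then
                (match PySem.List.pyGet? S (n + i - k), PySem.List.pyGet? E (j + m - l) with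
                | some s2, some e2 => if s2 == e2 then count + 1 else count
                | _, _ => count)
              else count
            | _, _ => count)) count) count
      else count) count
    = count + cw4 N E S W i j k := by
  rw [PySem.List.foldl_congr_mem (g := fun acc l => acc +
    (if PySem.List.pyGetD W l ' ' = PySem.List.pyGetD N k ' ' ∧ l ≤ (W.length : Int) - 3
      then cw5 E S W i j k l else 0))]
  · rw [PySem.List.foldl_add, cw4]
    congr 1
    exact (pvSumExt (W.length : Int) ((W.length : Int) - 2) (by omega) _
      (fun x hx0 hx1 => if_neg (fun hc => absurd hc.2 (by omega)))).symm
  · intro acc l hlm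
    have hmem := (PySem.List.mem_pyRange_one).mp hlm
    by_cases h1 : PySem.List.pyGetD N k ' ' = PySem.List.pyGetD W l ' '
    · rw [if_pos (by simp [h1]), A5 E S W i j k l acc hj hmem.1 hik,
        if_pos ⟨h1.symm, by omega⟩]
    · rw [if_neg (by simp [h1]), if_neg (fun hc => h1 hc.1.symm), add_zero]

theorem A3 (N E S W : List Char) (i j count : Int) (hj : 0 ≤ j) :
    (PySem.List.pyRange 0 (i - 1) 1).foldl (fun count k =>
      (PySem.List.pyRange 0 ((W.length : Int) - 2) 1).foldl (fun count l =>
        if PySem.List.pyGetD N k ' ' == PySem.List.pyGetD W l ' ' then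
          (PySem.List.pyRange (l + 2) (W.length : Int) 1).foldl (fun count m =>
            (PySem.List.pyRange 0 ((S.length : Int) - (i - k)) 1).foldl (fun count n =>
              (match PySem.List.pyGet? W m, PySem.List.pyGet? S n with
              | some wm, some sn =>
                if wm == sn then
                  (match PySem.List.pyGet? S (n + i - k), PySem.List.pyGet? E (j + m - l) with
                  | some s2, some e2 => if s2 == e2 then count + 1 else count
                  | _, _ => count)
                else count
              | _, _ => count)) count) count
        else count) count) count
    = count + cw3 N E S W i j := by
  rw [PySem.List.foldl_congr_mem (g := fun acc k => acc + cw4 N E S W i j k)]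
  · rw [PySem.List.foldl_add, cw3]
  · intro acc k hk
    have hmem := (PySem.List.mem_pyRange_one).mp hk
    exact A4 N E S W i j k acc hj (by omega)

theorem A2 (N E S W : List Char) (i count : Int) :
    (PySem.List.pyRange 0 ((E.length : Int) - 2) 1).foldl (fun count j =>
      if PySem.List.pyGetD N i ' ' == PySem.List.pyGetD E j ' ' then
        (PySem.List.pyRange 0 (i - 1) 1).foldl (fun count k =>
          (PySem.List.pyRange 0 ((W.length : Int) - 2) 1).foldl (fun count l =>
            if PySem.List.pyGetD N k ' ' == PySem.List.pyGetD W l ' ' then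
              (PySem.List.pyRange (l + 2) (W.length : Int) 1).foldl (fun count m =>
                (PySem.List.pyRange 0 ((S.length : Int) - (i - k)) 1).foldl (fun count n =>
                  (match PySem.List.pyGet? W m, PySem.List.pyGet? S n with
                  | some wm, some sn =>
                    if wm == sn then
                      (match PySem.List.pyGet? S (n + i - k), PySem.List.pyGet? E (j + m - l) with
                      | some s2, some e2 => if s2 == e2 then count + 1 else count
                      | _, _ => count)
                    else count
                  | _, _ => count)) count) count
            else count) count) count
      else count) count
    = count + cw2 N E S W i := by
  rw [PySem.List.foldl_congr_mem (g := fun acc j => acc +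
    (if PySem.List.pyGetD E j ' ' = PySem.List.pyGetD N i ' ' ∧ j ≤ (E.length : Int) - 3
      then cw3 N E S W i j else 0))]
  · rw [PySem.List.foldl_add, cw2]
    congr 1
    exact (pvSumExt (E.length : Int) ((E.length : Int) - 2) (by omega) _
      (fun x hx0 hx1 => if_neg (fun hc => absurd hc.2 (by omega)))).symm
  · intro acc j hjm
    have hmem := (PySem.List.mem_pyRange_one).mp hjm
    by_cases h1 : PySem.List.pyGetD N i ' ' = PySem.List.pyGetD E j ' '
    · rw [if_pos (by simp [h1]), A3 N E S W i j acc hmem.1, if_pos ⟨h1.symm, by omega⟩]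
    · rw [if_neg (by simp [h1]), if_neg (fun hc => h1 hc.1.symm), add_zero]

theorem B6 (E S W : List Char) (i j k l m count : Int) :
    ((pvPositions S).getD (PySem.List.pyGetD W m ' ') []).foldl
      (fun total n => if n + (i - k) < (S.length : Int) ∧ j + m - l < (E.length : Int) ∧
          PySem.List.pyGetD S (n + (i - k)) ' ' = PySem.List.pyGetD E (j + m - l) ' '
        then total + 1 else total) count
    = count + cw6 E S W i j k l m := by
  rw [pvPositions_getD, ← PySem.List.foldl_if_eq_foldl_filter]
  rw [PySem.List.foldl_congr_mem (g := fun acc n => acc +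
    (if PySem.List.pyGetD S n ' ' = PySem.List.pyGetD W m ' ' ∧ n + (i - k) < (S.length : Int) ∧
        j + m - l < (E.length : Int) ∧
        PySem.List.pyGetD S (n + (i - k)) ' ' = PySem.List.pyGetD E (j + m - l) ' '
      then (1 : Int) else 0))]
  · rw [PySem.List.foldl_add, cw6]
  · intro acc n _
    by_cases h1 : PySem.List.pyGetD S n ' ' = PySem.List.pyGetD W m ' ' <;> simp [h1] <;>
      split_ifs <;> simp

theorem B5 (E S W : List Char) (i j k l count : Int) :
    (PySem.List.pyRange (l + 2) (W.length : Int) 1).foldl (fun total m =>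
      ((pvPositions S).getD (PySem.List.pyGetD W m ' ') []).foldl
        (fun total n => if n + (i - k) < (S.length : Int) ∧ j + m - l < (E.length : Int) ∧
            PySem.List.pyGetD S (n + (i - k)) ' ' = PySem.List.pyGetD E (j + m - l) ' '
          then total + 1 else total) total) count
    = count + cw5 E S W i j k l := by
  rw [PySem.List.foldl_congr_mem (g := fun acc m => acc + cw6 E S W i j k l m)]
  · rw [PySem.List.foldl_add, cw5]
  · intro acc m _; exact B6 E S W i j k l m acc

theorem B4 (N E S W : List Char) (i j k count : Int) :
    ((pvPositions W).getD (PySem.List.pyGetD N k ' ') []).foldl (fun total l =>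
      if l ≤ (W.length : Int) - 3 then
        (PySem.List.pyRange (l + 2) (W.length : Int) 1).foldl (fun total m =>
          ((pvPositions S).getD (PySem.List.pyGetD W m ' ') []).foldl
            (fun total n => if n + (i - k) < (S.length : Int) ∧ j + m - l < (E.length : Int) ∧
                PySem.List.pyGetD S (n + (i - k)) ' ' = PySem.List.pyGetD E (j + m - l) ' '
              then total + 1 else total) total) total
      else total) count
    = count + cw4 N E S W i j k := by
  rw [pvPositions_getD, ← PySem.List.foldl_if_eq_foldl_filter]
  rw [PySem.List.foldl_congr_mem (g := fun acc l => acc +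
    (if PySem.List.pyGetD W l ' ' = PySem.List.pyGetD N k ' ' ∧ l ≤ (W.length : Int) - 3
      then cw5 E S W i j k l else 0))]
  · rw [PySem.List.foldl_add, cw4]
  · intro acc l _
    by_cases h1 : PySem.List.pyGetD W l ' ' = PySem.List.pyGetD N k ' ' <;>
      by_cases h2 : l ≤ (W.length : Int) - 3 <;> simp [h1, h2, B5]

theorem B3 (N E S W : List Char) (i j count : Int) :
    (PySem.List.pyRange 0 (i - 1) 1).foldl (fun total k =>
      ((pvPositions W).getD (PySem.List.pyGetD N k ' ') []).foldl (fun total l =>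
        if l ≤ (W.length : Int) - 3 then
          (PySem.List.pyRange (l + 2) (W.length : Int) 1).foldl (fun total m =>
            ((pvPositions S).getD (PySem.List.pyGetD W m ' ') []).foldl
              (fun total n => if n + (i - k) < (S.length : Int) ∧ j + m - l < (E.length : Int) ∧
                  PySem.List.pyGetD S (n + (i - k)) ' ' = PySem.List.pyGetD E (j + m - l) ' '
                then total + 1 else total) total) total
        else total) total) count
    = count + cw3 N E S W i j := by
  rw [PySem.List.foldl_congr_mem (g := fun acc k => acc + cw4 N E S W i j k)]
  · rw [PySem.List.foldl_add, cw3]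
  · intro acc k _; exact B4 N E S W i j k acc

theorem B2 (N E S W : List Char) (i count : Int) :
    ((pvPositions E).getD (PySem.List.pyGetD N i ' ') []).foldl (fun total j =>
      if j ≤ (E.length : Int) - 3 then
        (PySem.List.pyRange 0 (i - 1) 1).foldl (fun total k =>
          ((pvPositions W).getD (PySem.List.pyGetD N k ' ') []).foldl (fun total l =>
            if l ≤ (W.length : Int) - 3 then
              (PySem.List.pyRange (l + 2) (W.length : Int) 1).foldl (fun total m =>
                ((pvPositions S).getD (PySem.List.pyGetD W m ' ') []).foldl
                  (fun total n => if n + (i - k) < (S.length : Int) ∧ j + m - l < (E.length : Int) ∧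
                      PySem.List.pyGetD S (n + (i - k)) ' ' = PySem.List.pyGetD E (j + m - l) ' '
                    then total + 1 else total) total) total
            else total) total) total
      else total) count
    = count + cw2 N E S W i := by
  rw [pvPositions_getD, ← PySem.List.foldl_if_eq_foldl_filter]
  rw [PySem.List.foldl_congr_mem (g := fun acc j => acc +
    (if PySem.List.pyGetD E j ' ' = PySem.List.pyGetD N i ' ' ∧ j ≤ (E.length : Int) - 3
      then cw3 N E S W i j else 0))]
  · rw [PySem.List.foldl_add, cw2]
  · intro acc j _
    by_cases h1 : PySem.List.pyGetD E j ' ' = PySem.List.pyGetD N i ' ' <;>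
      by_cases h2 : j ≤ (E.length : Int) - 3 <;> simp [h1, h2, B3]

theorem pvInnerA (north east south west : String) (count : Int) :
    (PySem.List.pyRange 2 (north.toList.length : Int) 1).foldl (fun count i =>
      (PySem.List.pyRange 0 ((east.toList.length : Int) - 2) 1).foldl (fun count j =>
        if PySem.List.pyGetD north.toList i ' ' == PySem.List.pyGetD east.toList j ' ' then
          (PySem.List.pyRange 0 (i - 1) 1).foldl (fun count k =>
            (PySem.List.pyRange 0 ((west.toList.length : Int) - 2) 1).foldl (fun count l =>
              if PySem.List.pyGetD north.toList k ' ' == PySem.List.pyGetD west.toList l ' ' then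
                (PySem.List.pyRange (l + 2) (west.toList.length : Int) 1).foldl (fun count m =>
                  (PySem.List.pyRange 0 ((south.toList.length : Int) - (i - k)) 1).foldl (fun count n =>
                    (match PySem.List.pyGet? west.toList m, PySem.List.pyGet? south.toList n with
                    | some wm, some sn =>
                      if wm == sn then
                        (match PySem.List.pyGet? south.toList (n + i - k), PySem.List.pyGet? east.toList (j + m - l) with
                        | some s2, some e2 => if s2 == e2 then count + 1 else count
                        | _, _ => count)
                      else count
                    | _, _ => count))
                    count) count
              else count) count) count
        else count) count) count
    = count + cw1 north.toList east.toList south.toList west.toList := by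
  rw [PySem.List.foldl_congr_mem (g := fun acc i => acc + cw2 north.toList east.toList south.toList west.toList i)]
  · rw [PySem.List.foldl_add, cw1]
  · intro acc i _
    exact A2 north.toList east.toList south.toList west.toList i acc

theorem pvInnerB (north east south west : String) :
    pvCrossCount north east south west (pvIJs north.toList east.toList (pvPositions east.toList))
      (pvPositions south.toList) (pvPositions west.toList)
    = cw1 north.toList east.toList south.toList west.toList := by
  unfold pvCrossCount pvIJs
  rw [List.foldl_flatMap]
  rw [PySem.List.foldl_congr_mem (g := fun acc i => acc + cw2 north.toList east.toList south.toList west.toList i)]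
  · rw [PySem.List.foldl_add, cw1, zero_add]
  · intro acc i _
    rw [List.foldl_map, ← PySem.List.foldl_if_eq_foldl_filter]
    have hB2 := B2 north.toList east.toList south.toList west.toList i acc
    simp only [decide_eq_true_eq]
    exact hB2
theorem pvMemRemove {l : List String} {x v : String} (h : v ∈ (PySem.List.remove? l x).getD []) :
    v ∈ l := by
  by_cases hx : x ∈ l
  · rw [PySem.List.remove?_eq_some_erase (v := x) (xs := l) hx] at h
    exact List.mem_of_mem_erase (by simpa using h)
  · rw [(PySem.List.remove?_eq_none_iff l x).mpr hx] at h
    simp at h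

theorem pvIndexSkip (f : String → PySem.Dict Char (List Int)) (l : List String)
    (d : PySem.Dict String (PySem.Dict Char (List Int))) (v : String) (d0 : PySem.Dict Char (List Int))
    (hv : v ∉ l) :
    (l.foldl (fun d w => d.insert w (f w)) d).getD v d0 = d.getD v d0 := by
  induction l generalizing d with
  | nil => rfl
  | cons w t ih =>
    simp only [List.foldl_cons]
    rw [ih (d.insert w (f w)) (fun h => hv (List.mem_cons_of_mem w h)),
      PySem.Dict.getD_insert_of_ne (hne := fun h => hv (by rw [h]; exact List.mem_cons_self))]

theorem pvIndexGetD (f : String → PySem.Dict Char (List Int)) (l : List String)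
    (d : PySem.Dict String (PySem.Dict Char (List Int))) (v : String) (d0 : PySem.Dict Char (List Int))
    (hv : v ∈ l) :
    (l.foldl (fun d w => d.insert w (f w)) d).getD v d0 = f v := by
  induction l generalizing d with
  | nil => cases hv
  | cons w t ih =>
    simp only [List.foldl_cons]
    by_cases hvt : v ∈ t
    · exact ih _ hvt
    · have hvw : v = w := by
        rcases List.mem_cons.mp hv with h | h
        · exact h
        · exact absurd h hvt
      subst hvw
      rw [pvIndexSkip f t _ v d0 hvt, PySem.Dict.getD_insert_self]

-- ===== VERDICT (by name: the statement is the Claim_ definition above) =====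
theorem crosswordFormation_spec : Claim_equal_crosswordFormation := by
  intro words _
  unfold Spec_crosswordFormation crosswordFormation crosswordFormation_alt
  apply PySem.List.foldl_congr_mem; intro c0 north hn
  apply PySem.List.foldl_congr_mem; intro c1 east he
  apply PySem.List.foldl_congr_mem; intro c2 south hs
  apply PySem.List.foldl_congr_mem; intro c3 west hw
  have he' : east ∈ words := pvMemRemove he
  have hs' : south ∈ words := pvMemRemove (pvMemRemove hs)
  have hw' : west ∈ words := pvMemRemove (pvMemRemove (pvMemRemove hw))
  rw [pvIndexGetD _ _ _ _ _ he', pvIndexGetD _ _ _ _ _ hs', pvIndexGetD _ _ _ _ _ hw',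
    pvInnerA, pvInnerB]
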